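-- pv_equiv track=rewrite | github.com/StarsExpress/LeetCode-Repository | hash/integers_reduction.py | reduce_half_integers
-- ===== SOURCE A (Python) =====
-- def reduce_half_integers(integers: list[int]):  # LeetCode Q.1338.
--     distinct_ints = set(integers)
--     total_distinct_ints, total_ints = len(distinct_ints), len(integers)
--     if total_distinct_ints == 1:
--         return 1
--
--     counts = dict(zip(distinct_ints, [0] * total_distinct_ints))  # Dict of each int's count.
--     for integer in integers:
--         counts[integer] += 1
--
--     counts = list(counts.values())
--     counts.sort(reverse=True)  # Start from bigger counts to minimize distinct ints used during reduction.
--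
--     target_size, cumulated_size, current_idx = total_ints // 2, counts[0], 1
--     if total_ints % 2 == 1:
--         target_size += 1
--
--     while cumulated_size < target_size:
--         cumulated_size += counts[current_idx]
--         current_idx += 1
--
--     return current_idx
-- ===== SOURCE B (Python) =====
-- def reduce_half_integers(integers: list[int]):  # counting-sort on frequencies; no sort of the counts list
--     freq = {}
--     for x in integers:
--         freq[x] = freq.get(x, 0) + 1
--     n = len(integers)
--     bucket = [0] * (n + 1)  # bucket[c] = number of distinct values occurring exactly c times
--     for c in freq.values():
--         bucket[c] += 1
--     target = (n + 1) // 2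
--     accumulated = 0
--     used = 0
--     for c in range(n, 0, -1):
--         if accumulated >= target:
--             break
--         k = bucket[c]
--         while k > 0 and accumulated < target:
--             accumulated += c
--             used += 1
--             k -= 1
--     return used
-- ===== Notes on version B (the rewrite author's own statement) =====
-- stated objective: alternative
-- what changed: B replaces A's seeded dict + sort of the frequency list + indexed while-scan by a single counting pass and a counting-sort bucket walk from the highest frequency down, so no comparison sort is performed.
-- outside the precondition, e.g. on reduce_half_integers([]): A raises IndexError, B returns 0
import Mathlib
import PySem

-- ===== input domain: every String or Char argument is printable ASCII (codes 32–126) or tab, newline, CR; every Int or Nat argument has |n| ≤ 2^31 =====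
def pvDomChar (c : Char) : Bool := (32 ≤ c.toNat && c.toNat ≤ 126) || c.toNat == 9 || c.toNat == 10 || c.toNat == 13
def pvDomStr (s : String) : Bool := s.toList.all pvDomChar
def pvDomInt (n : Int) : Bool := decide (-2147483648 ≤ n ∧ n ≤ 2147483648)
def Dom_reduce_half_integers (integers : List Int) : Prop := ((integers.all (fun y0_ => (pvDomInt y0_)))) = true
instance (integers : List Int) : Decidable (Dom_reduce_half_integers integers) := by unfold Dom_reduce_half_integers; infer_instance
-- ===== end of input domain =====

-- B replaces A's sort of the frequency list by a counting-sort bucket walk; return-value equivalence only (A sorts a local list it built).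

-- ===== PORT A =====
-- A's while loop: 'while cumulated_size < target_size: cumulated_size += counts[current_idx]; current_idx += 1'.
-- The [] case is Python's IndexError; it is unreachable on inputs satisfying Pre_ (the counts sum to len(integers) ≥ target).
def reduceLoopA (target : Int) : List Int → Int → Int → Int
  | rest, cumulated, idx =>
    if cumulated < target then
      match rest with
      | [] => idx
      | c :: rs => reduceLoopA target rs (cumulated + c) (idx + 1)
    else idx

def reduce_half_integers (integers : List Int) : Int :=
  let distinct_ints := PySem.Set.ofList integers
  let total_distinct_ints : Int := distinct_ints.length
  let total_ints : Int := integers.length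
  if total_distinct_ints = 1 then 1
  else
    -- counts = dict(zip(distinct_ints, [0] * total_distinct_ints)); then 'counts[integer] += 1'
    -- ('counts[integer] += 1' is modify with default 0: the key is always present, so this is exact)
    let counts0 := PySem.Dict.ofList (distinct_ints.zip (PySem.List.pyRepeat [(0 : Int)] total_distinct_ints))
    let counts := integers.foldl (fun d i => d.modify i 0 (· + 1)) counts0
    let countsSorted := PySem.List.sorted counts.values (fun x => x) true
    let target_size0 := PySem.Int.floordiv total_ints 2
    let target_size := if PySem.Int.mod total_ints 2 = 1 then target_size0 + 1 else target_size0
    match countsSorted with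
    | [] => 0  -- Python raises IndexError at counts[0] (only when integers = []); excluded by Pre_
    | c0 :: rest => reduceLoopA target_size rest c0 1

-- ===== PORT B =====
-- inner 'while k > 0 and accumulated < target' (k = bucket[c] ≥ 0, recursion on k as a Nat)
def reduceInnerB (c target : Int) : Nat → Int × Int → Int × Int
  | 0, s => s
  | k + 1, (acc, used) =>
    if acc < target then reduceInnerB c target k (acc + c, used + 1) else (acc, used)

-- 'for c in range(n, 0, -1): if accumulated >= target: break; …'
def reduceLoopB (bucket : List Int) (target : Int) : List Int → Int × Int → Int
  | [], s => s.2
  | c :: cs, (acc, used) =>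
    if target ≤ acc then used
    else
      -- k = bucket[c]; c is always within range(len(bucket)) here
      reduceLoopB bucket target cs
        (reduceInnerB c target (PySem.List.pyGetD bucket c 0).toNat (acc, used))

def reduce_half_integers_alt (integers : List Int) : Int :=
  let freq := integers.foldl (fun d x => d.insert x (d.getD x 0 + 1)) PySem.Dict.empty
  let n : Int := integers.length
  -- bucket[c] += 1: every frequency c satisfies 1 ≤ c ≤ n < len(bucket), so the total pySetD/pyGetD forms are exact
  let bucket := freq.values.foldl
    (fun b c => PySem.List.pySetD b c (PySem.List.pyGetD b c 0 + 1))
    (PySem.List.pyRepeat [(0 : Int)] (n + 1))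
  let target := PySem.Int.floordiv (n + 1) 2
  reduceLoopB bucket target (PySem.List.pyRange n 0 (-1)) (0, 0)

-- ===== PRECONDITION & SPEC =====
-- Pre_ excludes only the empty list, on which Python A raises IndexError (counts[0] of an empty list).
def Pre_reduce_half_integers (integers : List Int) : Prop := integers ≠ []
instance (integers : List Int) : Decidable (Pre_reduce_half_integers integers) := by
  unfold Pre_reduce_half_integers; infer_instance

def pvWitness_reduce_half_integers : List Int := [1, 2, 2]

def Spec_reduce_half_integers (integers : List Int) (out : Int) : Prop := out = reduce_half_integers_alt integers
instance (integers : List Int) (out : Int) : Decidable (Spec_reduce_half_integers integers out) := by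
  unfold Spec_reduce_half_integers; infer_instance

-- ===== CLAIM (what is proved, stated in full; the proofs are below) =====
def Claim_equal_reduce_half_integers : Prop := ∀ (integers : List Int), Dom_reduce_half_integers integers → Pre_reduce_half_integers integers → Spec_reduce_half_integers integers (reduce_half_integers integers)

-- ===== LEMMAS AND PROOFS =====

-- the common greedy scan: consume elements while acc < target, counting how many were consumed
def gp (target : Int) : List Int → Int × Int → Int × Int
  | [], s => s
  | c :: cs, (acc, used) =>
    if acc < target then gp target cs (acc + c, used + 1) else (acc, used)

theorem gp_stop (t : Int) (L : List Int) (acc used : Int) (h : ¬ acc < t) :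
    gp t L (acc, used) = (acc, used) := by
  cases L <;> simp [gp, h]

theorem gp_append (t : Int) (L1 L2 : List Int) :
    ∀ s : Int × Int, gp t (L1 ++ L2) s = gp t L2 (gp t L1 s) := by
  induction L1 with
  | nil => intro s; simp [gp]
  | cons c cs ih =>
    intro ⟨acc, used⟩
    by_cases h : acc < t
    · simp [gp, h, ih]
    · simp [gp, h, gp_stop t L2 acc used h]

theorem loopA_eq_gp (t : Int) (rest : List Int) :
    ∀ cum idx : Int, reduceLoopA t rest cum idx = (gp t rest (cum, idx)).2 := by
  induction rest with
  | nil => intro cum idx; by_cases h : cum < t <;> simp [reduceLoopA, gp, h]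
  | cons c rs ih =>
    intro cum idx
    by_cases h : cum < t <;> simp [reduceLoopA, gp, h, ih]

theorem innerB_eq_gp (c t : Int) : ∀ (k : Nat) (s : Int × Int),
    reduceInnerB c t k s = gp t (List.replicate k c) s := by
  intro k
  induction k with
  | zero => intro s; simp [reduceInnerB, gp]
  | succ k ih =>
    intro ⟨acc, used⟩
    by_cases h : acc < t <;> simp [reduceInnerB, List.replicate_succ, gp, h, ih]

theorem loopB_eq_gp (bucket : List Int) (t : Int) (cnt : Int → Nat) :
    ∀ (rng : List Int), (∀ c ∈ rng, PySem.List.pyGetD bucket c 0 = (cnt c : Int)) →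
    ∀ s : Int × Int,
      reduceLoopB bucket t rng s
        = (gp t ((rng.map (fun c => List.replicate (cnt c) c)).flatten) s).2 := by
  intro rng
  induction rng with
  | nil => intro _ s; simp [reduceLoopB, gp]
  | cons c cs ih =>
    intro h ⟨acc, used⟩
    have hc : PySem.List.pyGetD bucket c 0 = (cnt c : Int) := h c (by simp)
    have hcs : ∀ c' ∈ cs, PySem.List.pyGetD bucket c' 0 = (cnt c' : Int) := by
      intro c' hc'; exact h c' (by simp [hc'])
    by_cases hstop : t ≤ acc
    · have : ¬ acc < t := by omega
      simp only [reduceLoopB, hstop, if_pos]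
      rw [List.map_cons, List.flatten_cons, gp_append, gp_stop t _ acc used this,
        gp_stop t _ acc used this]
    · have hlt : acc < t := by omega
      simp only [reduceLoopB, hstop, if_neg, not_false_iff]
      rw [ih hcs, hc, Int.toNat_natCast, innerB_eq_gp, List.map_cons, List.flatten_cons,
        gp_append]

-- sum of an ite-map over a Nodup list
theorem sum_map_ite_nodup (l : List Int) (hl : l.Nodup) (x : Int) (f : Int → Nat) :
    (l.map (fun c => if c = x then f c else 0)).sum = if x ∈ l then f x else 0 := by
  induction l with
  | nil => simp
  | cons a l ih =>
    simp only [List.nodup_cons] at hl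
    by_cases hax : a = x
    · subst hax
      simp [ih hl.2, hl.1]
    · simp [hax, ih hl.2, Ne.symm hax]

theorem pyGetD_replicate_zero (m : Nat) (c : Int) :
    PySem.List.pyGetD (List.replicate m (0 : Int)) c 0 = 0 := by
  unfold PySem.List.pyGetD PySem.List.pyGet?
  cases h : PySem.List.pyIdx? (List.replicate m (0 : Int)).length c with
  | none => simp
  | some k =>
    cases hk : (List.replicate m (0 : Int))[k]? with
    | none => simp [hk]
    | some v =>
      have := List.mem_of_getElem? hk
      simp [hk, List.eq_of_mem_replicate this]

theorem pyGetD_pySetD_int (xs : List Int) (v c x : Int)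
    (h0 : 0 ≤ v) (h1 : v < (xs.length : Int)) (hc : 0 ≤ c) :
    PySem.List.pyGetD (PySem.List.pySetD xs v x) c 0
      = if c = v then x else PySem.List.pyGetD xs c 0 := by
  obtain ⟨vn, rfl⟩ : ∃ m : Nat, v = (m : Int) := ⟨v.toNat, by omega⟩
  obtain ⟨cn, rfl⟩ : ∃ m : Nat, c = (m : Int) := ⟨c.toNat, by omega⟩
  rw [PySem.List.pyGetD_pySetD_natCast xs vn cn x 0 (by exact_mod_cast h1)]
  by_cases h : cn = vn
  · simp [h]
  · have : ¬ ((cn : Int) = (vn : Int)) := by exact_mod_cast h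
    simp [h, this]

theorem bucket_count (vals : List Int) :
    ∀ (b : List Int), (∀ v ∈ vals, 0 ≤ v ∧ v < (b.length : Int)) →
    ∀ c : Int, 0 ≤ c →
    PySem.List.pyGetD
        (vals.foldl (fun b v => PySem.List.pySetD b v (PySem.List.pyGetD b v 0 + 1)) b) c 0
      = PySem.List.pyGetD b c 0 + (vals.count c : Int) := by
  induction vals with
  | nil => intro b _ c _; simp
  | cons v vs ih =>
    intro b hv c hc
    have hv0 := hv v (by simp)
    set b' := PySem.List.pySetD b v (PySem.List.pyGetD b v 0 + 1) with hb'
    have hlen : b'.length = b.length := PySem.List.length_pySetD b v _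
    have hvs : ∀ w ∈ vs, 0 ≤ w ∧ w < (b'.length : Int) := by
      intro w hw; rw [hlen]; exact hv w (by simp [hw])
    have hgd : PySem.List.pyGetD b' c 0
        = if c = v then PySem.List.pyGetD b v 0 + 1 else PySem.List.pyGetD b c 0 :=
      pyGetD_pySetD_int b v c _ hv0.1 hv0.2 hc
    rw [List.foldl_cons, ih b' hvs c hc, hgd, List.count_cons]
    by_cases h : c = v
    · simp [h]; ring
    · have : ¬ (v == c) = true := by simp [beq_iff_eq]; omega
      simp [h, this]

-- the seeded dict 'dict(zip(ks, [0]*len(ks)))' maps every key to 0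
theorem getD_seed (ks : List Int) :
    ∀ (d : PySem.Dict Int Int) (k : Int),
      ((ks.zip (List.replicate ks.length (0 : Int))).foldl
          (fun acc p => acc.insert p.1 p.2) d).getD k 0
        = if k ∈ ks then 0 else d.getD k 0 := by
  induction ks with
  | nil => intro d k; simp
  | cons a ks ih =>
    intro d k
    simp only [List.length_cons, List.replicate_succ, List.zip_cons_cons, List.foldl_cons]
    rw [ih (d.insert a 0) k, PySem.Dict.getD_insert]
    by_cases hk : k ∈ ks
    · simp [hk]
    · by_cases hka : k = a <;> simp [hk, hka]

-- walking the buckets from n down to 1 visits exactly the frequency list sorted in descending order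
theorem flatten_desc_eq_sorted (V : List Int) (n : Nat)
    (hpos : ∀ v ∈ V, 1 ≤ v) (hle : ∀ v ∈ V, v ≤ (n : Int)) :
    ((PySem.List.pyRange (n : Int) 0 (-1)).map (fun c => List.replicate (V.count c) c)).flatten
      = PySem.List.sorted V (fun x => x) true := by
  set rng := PySem.List.pyRange (n : Int) 0 (-1) with hrng
  have hnodup : rng.Nodup := by
    rw [hrng, PySem.List.pyRange_neg_one_eq_reverse]
    exact List.nodup_reverse.2 (PySem.List.nodup_pyRange_one _ _)
  have hperm : ((rng.map (fun c => List.replicate (V.count c) c)).flatten).Perm V := by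
    apply List.perm_iff_count.2
    intro x
    rw [List.count_flatten, List.map_map]
    have hfun : ∀ c ∈ rng,
        ((fun l => List.count x l) ∘ fun c => List.replicate (V.count c) c) c
          = (fun c => if c = x then V.count c else 0) c := by
      intro c _
      simp only [Function.comp_apply, List.count_replicate, beq_iff_eq]
    rw [List.map_congr_left hfun, sum_map_ite_nodup rng hnodup x (fun c => V.count c)]
    by_cases hx : x ∈ rng
    · simp [hx]
    · rw [if_neg hx]
      have hxV : x ∉ V := by
        intro hxV
        exact hx (by
          rw [hrng, PySem.List.mem_pyRange_neg_one]
          exact ⟨by linarith [hpos x hxV], hle x hxV⟩)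
      exact (List.count_eq_zero.2 hxV).symm
  have hpair : List.Pairwise (fun a b : Int => b ≤ a)
      ((rng.map (fun c => List.replicate (V.count c) c)).flatten) := by
    rw [List.pairwise_flatten]
    constructor
    · intro l hl
      obtain ⟨c, _, rfl⟩ := List.mem_map.1 hl
      exact List.pairwise_replicate.2 (Or.inr le_rfl)
    · rw [List.pairwise_map]
      have hr : rng.Pairwise (fun a b => b < a) := by
        rw [hrng, PySem.List.pyRange_neg_one_eq_reverse, List.pairwise_reverse]
        exact PySem.List.pairwise_lt_pyRange_one _ _
      exact hr.imp (fun {a b} h => by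
        intro x hx y hy
        rw [List.eq_of_mem_replicate hx, List.eq_of_mem_replicate hy]
        exact le_of_lt h)
  exact List.eq_of_perm_of_sorted (fun a b _ _ h1 h2 => le_antisymm h2 h1)
    hpair (PySem.List.sorted_pairwise_rev V (fun x => x))
    (hperm.trans (PySem.List.sorted_perm V (fun x => x) true).symm)

-- A's target 'n // 2 (+1 if n odd)' equals B's '(n + 1) // 2'
theorem target_eq (n : Nat) :
    (if PySem.Int.mod (n : Int) 2 = 1 then PySem.Int.floordiv (n : Int) 2 + 1
     else PySem.Int.floordiv (n : Int) 2)
      = PySem.Int.floordiv ((n : Int) + 1) 2 := by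
  have h1 : ((n : Int) + 1) = ((n + 1 : Nat) : Int) := by push_cast; ring
  rw [h1]
  rw [show ((2:Int) = ((2:Nat):Int)) from rfl]
  rw [PySem.Int.floordiv_natCast, PySem.Int.floordiv_natCast, PySem.Int.mod_natCast]
  split_ifs with h <;> omega

-- the values of A's seeded-then-incremented dict are the counts of the distinct elements, in order
theorem A_values (xs : List Int) :
    (xs.foldl (fun d i => d.modify i 0 (· + 1))
        (PySem.Dict.ofList ((PySem.Set.ofList xs).zip
          (List.replicate (PySem.Set.ofList xs).length (0 : Int))))).values
      = (PySem.Set.ofList xs).map (fun k => (xs.count k : Int)) := by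
  set dist := PySem.Set.ofList xs with hdist
  set d0 := PySem.Dict.ofList (dist.zip (List.replicate dist.length (0 : Int))) with hd0
  have hdistnd : dist.Nodup := PySem.Set.nodup_ofList xs
  have hkeys0 : d0.keys = dist := by
    rw [hd0]
    show ((dist.zip (List.replicate dist.length (0 : Int))).foldl
      (fun acc p => acc.insert p.1 p.2) PySem.Dict.empty).keys = dist
    rw [PySem.Dict.keys_foldl_insert_key _ Prod.fst (fun _ p => p.2) _]
    rw [PySem.Dict.keys_empty, PySem.Set.update_nil_left]
    rw [List.map_fst_zip (by simp)]
    exact PySem.Set.ofList_eq_self_of_nodup dist hdistnd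
  have hkeys : (xs.foldl (fun d i => d.modify i 0 (· + 1)) d0).keys = dist := by
    rw [show (fun (d : PySem.Dict Int Int) (i : Int) => d.modify i 0 (· + 1))
        = (fun d x => d.modify x 0 ((fun _ _ => (· + 1)) d x)) from rfl]
    rw [PySem.Dict.keys_foldl_modify, hkeys0, PySem.Set.update_eq_append_filter]
    rw [List.filter_eq_nil_iff.2 (by
      intro y hy
      have hym : y ∈ dist := hy
      simp only [Bool.not_eq_eq_eq_not, Bool.not_true, ← Bool.not_eq_true]
      intro hcon
      exact hcon ((PySem.Set.contains_iff dist y).2 hym)), List.append_nil]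
  have hnodup : (xs.foldl (fun d i => d.modify i 0 (· + 1)) d0).keys.Nodup := by
    rw [hkeys]; exact hdistnd
  rw [PySem.Dict.values_eq_map_keys _ hnodup 0, hkeys]
  apply List.map_congr_left
  intro k hk
  rw [PySem.Dict.getD_foldl_modify_add_one xs d0 k]
  have : d0.getD k 0 = 0 := by
    rw [hd0]
    show ((dist.zip (List.replicate dist.length (0 : Int))).foldl
      (fun acc p => acc.insert p.1 p.2) PySem.Dict.empty).getD k 0 = 0
    rw [getD_seed dist PySem.Dict.empty k, if_pos hk]
  rw [this, zero_add]

theorem main_eq (xs : List Int) (hne : xs ≠ []) :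
    reduce_half_integers xs = reduce_half_integers_alt xs := by
  set dist := PySem.Set.ofList xs with hdist
  set V := dist.map (fun k => (xs.count k : Int)) with hV
  set n := xs.length with hn
  set t : Int := PySem.Int.floordiv ((n : Int) + 1) 2 with ht
  have hn1 : 1 ≤ n := List.length_pos_of_ne_nil hne
  have ht1 : 1 ≤ t := by
    rw [ht, show ((n : Int) + 1) = ((n + 1 : Nat) : Int) from by push_cast; ring,
      show ((2:Int) = ((2:Nat):Int)) from rfl, PySem.Int.floordiv_natCast]
    omega
  have hpos : ∀ v ∈ V, 1 ≤ v := by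
    intro v hv
    rw [hV] at hv
    obtain ⟨k, hk, rfl⟩ := List.mem_map.1 hv
    have : k ∈ xs := (PySem.Set.mem_ofList xs k).1 hk
    have := List.count_pos_iff.2 this
    omega
  have hle : ∀ v ∈ V, v ≤ (n : Int) := by
    intro v hv
    rw [hV] at hv
    obtain ⟨k, _, rfl⟩ := List.mem_map.1 hv
    exact_mod_cast List.count_le_length
  -- B reduces to the greedy scan over the descending frequency list
  have hB : reduce_half_integers_alt xs
      = (gp t (PySem.List.sorted V (fun x => x) true) (0, 0)).2 := by
    show (let freq := xs.foldl (fun d x => d.insert x (d.getD x 0 + 1)) PySem.Dict.empty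
      let nn : Int := xs.length
      let bucket := freq.values.foldl
        (fun b c => PySem.List.pySetD b c (PySem.List.pyGetD b c 0 + 1))
        (PySem.List.pyRepeat [(0 : Int)] (nn + 1))
      let target := PySem.Int.floordiv (nn + 1) 2
      reduceLoopB bucket target (PySem.List.pyRange nn 0 (-1)) (0, 0)) = _
    simp only [PySem.Dict.foldl_insert_getD_add_one_eq_counter]
    have hvals : (PySem.Dict.counter xs).values = V := by
      rw [PySem.Dict.values_eq_map_keys _
        (by rw [PySem.Dict.keys_counter]; exact PySem.Set.nodup_ofList xs) 0,
        PySem.Dict.keys_counter]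
      exact List.map_congr_left (fun k _ => PySem.Dict.getD_counter xs k)
    simp only [hvals]
    have hbucket : ∀ c ∈ PySem.List.pyRange ((xs.length : Int)) 0 (-1),
        PySem.List.pyGetD
          (V.foldl (fun b c => PySem.List.pySetD b c (PySem.List.pyGetD b c 0 + 1))
            (PySem.List.pyRepeat [(0 : Int)] ((xs.length : Int) + 1))) c 0
          = ((V.count c : Nat) : Int) := by
      intro c hc
      rw [PySem.List.mem_pyRange_neg_one] at hc
      rw [show PySem.List.pyRepeat [(0 : Int)] ((xs.length : Int) + 1)
          = List.replicate (n + 1) 0 from by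
        rw [PySem.List.pyRepeat_singleton]; congr 1]
      rw [bucket_count V _ (by
          intro v hv
          refine ⟨by linarith [hpos v hv], ?_⟩
          have := hle v hv
          simp only [List.length_replicate]
          omega) c (le_of_lt hc.1)]
      rw [pyGetD_replicate_zero, zero_add]
    rw [loopB_eq_gp _ _ (fun c => V.count c) _ hbucket (0, 0)]
    rw [flatten_desc_eq_sorted V n hpos hle]
  -- A
  show (let distinct_ints := PySem.Set.ofList xs
    let total_distinct_ints : Int := distinct_ints.length
    let total_ints : Int := xs.length
    if total_distinct_ints = 1 then 1
    else
      let counts0 := PySem.Dict.ofList (distinct_ints.zip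
        (PySem.List.pyRepeat [(0 : Int)] total_distinct_ints))
      let counts := xs.foldl (fun d i => d.modify i 0 (· + 1)) counts0
      let countsSorted := PySem.List.sorted counts.values (fun x => x) true
      let target_size0 := PySem.Int.floordiv total_ints 2
      let target_size := if PySem.Int.mod total_ints 2 = 1 then target_size0 + 1 else target_size0
      match countsSorted with
      | [] => 0
      | c0 :: rest => reduceLoopA target_size rest c0 1) = reduce_half_integers_alt xs
  simp only []
  have hrep : PySem.List.pyRepeat [(0 : Int)] ((dist.length : Int))
      = List.replicate dist.length (0 : Int) := by
    rw [PySem.List.pyRepeat_singleton]; congr 1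
  by_cases hcase : ((dist.length : Int) = 1)
  · rw [if_pos (by exact_mod_cast hcase)]
    obtain ⟨k, hk⟩ := List.length_eq_one_iff.1 (by exact_mod_cast hcase)
    have hxk : ∀ x ∈ xs, x = k := by
      intro x hx
      have : x ∈ dist := (PySem.Set.mem_ofList xs x).2 hx
      rw [hk] at this
      simpa using this
    have hcount : xs.count k = n := by
      rw [hn]
      exact List.count_eq_length.2 (fun b hb => by rw [hxk b hb])
    have hVk : V = [(n : Int)] := by
      rw [hV, hk, List.map_singleton, hcount]
    have hS : PySem.List.sorted V (fun x => x) true = [(n : Int)] := by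
      have hp := PySem.List.sorted_perm V (fun x => x) true
      rw [hVk] at hp ⊢
      exact List.perm_singleton.1 hp
    rw [hB, hS]
    have h0t : (0 : Int) < t := by omega
    simp [gp, h0t]
  · rw [if_neg (by exact_mod_cast hcase)]
    rw [hrep, A_values xs]
    rw [hB]
    have hSne : PySem.List.sorted V (fun x => x) true ≠ [] := by
      rw [Ne, PySem.List.sorted_eq_nil_iff, hV]
      intro h
      rcases List.map_eq_nil_iff.1 h with hd
      cases xs with
      | nil => exact hne rfl
      | cons a l =>
        have : a ∈ dist := (PySem.Set.mem_ofList _ a).2 (by simp)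
        rw [hd] at this
        simp at this
    obtain ⟨c0, rest, hS⟩ := List.exists_cons_of_ne_nil hSne
    have htA : (if PySem.Int.mod ((n : Int)) 2 = 1 then PySem.Int.floordiv ((n : Int)) 2 + 1
        else PySem.Int.floordiv ((n : Int)) 2) = t := by
      rw [target_eq n, ht]
    rw [htA, hS]
    show reduceLoopA t rest c0 1 = (gp t (c0 :: rest) (0, 0)).2
    rw [loopA_eq_gp]
    have h0t : (0 : Int) < t := by omega
    simp [gp, h0t]

theorem reduce_half_integers_spec : Claim_equal_reduce_half_integers := by
  intro xs _ hpre
  unfold Spec_reduce_half_integers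
  exact main_eq xs hpre
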